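-- pv_equiv track=rewrite | github.com/docxology/codomyrmex | src/codomyrmex/crypto/analysis/strength.py | _calculate_charset_size
-- ===== SOURCE A (Python) =====
-- import string
--
-- def _calculate_charset_size(password: str) -> int:
--     """Determine the effective character set size used in a password."""
--     charset = 0
--     has_lower = any(c in string.ascii_lowercase for c in password)
--     has_upper = any(c in string.ascii_uppercase for c in password)
--     has_digit = any(c in string.digits for c in password)
--     has_special = any(c in string.punctuation for c in password)
--     has_space = " " in password
--     has_other = any(
--         c not in string.ascii_letters + string.digits + string.punctuation + " "
--         for c in password
--     )
--
--     if has_lower: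
--         charset += 26
--     if has_upper:
--         charset += 26
--     if has_digit:
--         charset += 10
--     if has_special:
--         charset += 32
--     if has_space:
--         charset += 1
--     if has_other:
--         charset += 64  # approximate for unicode chars
--
--     return max(charset, 1)
-- ===== SOURCE B (Python) =====
-- def _calculate_charset_size(password: str) -> int:
--     """Single pass: classify each character into one disjoint class by code point."""
--     lower = upper = digit = special = space = other = False
--     for ch in password:
--         o = ord(ch)
--         if 97 <= o <= 122:
--             lower = True
--         elif 65 <= o <= 90:
--             upper = True
--         elif 48 <= o <= 57:
--             digit = True
--         elif 33 <= o <= 126: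
--             special = True
--         elif o == 32:
--             space = True
--         else:
--             other = True
--     total = 26 * lower + 26 * upper + 10 * digit + 32 * special + 1 * space + 64 * other
--     return max(total, 1)
-- ===== Notes on version B (the rewrite author's own statement) =====
-- stated objective: faster
-- what changed: Replaces A's six independent any()-scans over the password (plus a substring test) by a single pass that classifies each character into one disjoint code-point class via ord() range tests and sets per-class flags, then sums the fixed weights once.
import Mathlib
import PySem

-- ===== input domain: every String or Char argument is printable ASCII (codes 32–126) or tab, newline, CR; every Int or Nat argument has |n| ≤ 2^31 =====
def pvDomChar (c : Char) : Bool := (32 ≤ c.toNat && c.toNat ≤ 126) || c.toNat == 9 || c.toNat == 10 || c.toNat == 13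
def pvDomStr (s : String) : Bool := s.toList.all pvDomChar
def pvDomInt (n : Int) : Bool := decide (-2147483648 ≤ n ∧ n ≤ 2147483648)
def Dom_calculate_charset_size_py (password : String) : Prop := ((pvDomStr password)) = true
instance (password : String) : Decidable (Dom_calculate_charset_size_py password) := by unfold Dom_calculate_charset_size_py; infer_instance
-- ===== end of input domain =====

-- B replaces A's six independent scans of the password by one pass that classifies
-- each character into a disjoint class by code point, setting per-class flags (measured faster by a constant factor).

-- ===== PORT A =====
-- string.ascii_lowercase / ascii_uppercase / digits / punctuation, as character lists
def pvLowerChars : List Char := ['a', 'b', 'c', 'd', 'e', 'f', 'g', 'h', 'i', 'j', 'k', 'l', 'm', 'n', 'o', 'p', 'q', 'r', 's', 't', 'u', 'v', 'w', 'x', 'y', 'z']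
def pvUpperChars : List Char := ['A', 'B', 'C', 'D', 'E', 'F', 'G', 'H', 'I', 'J', 'K', 'L', 'M', 'N', 'O', 'P', 'Q', 'R', 'S', 'T', 'U', 'V', 'W', 'X', 'Y', 'Z']
def pvDigitChars : List Char := ['0', '1', '2', '3', '4', '5', '6', '7', '8', '9']
def pvPunctChars : List Char := ['!', '\"', '#', '$', '%', '&', '\'', '(', ')', '*', '+', ',', '-', '.', '/', ':', ';', '<', '=', '>', '?', '@', '[', '\\', ']', '^', '_', '`', '{', '|', '}', '~']

def calculate_charset_size_py (password : String) : Int :=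
  let charset : Int := 0
  let has_lower := password.toList.any (fun c => pvLowerChars.contains c)
  let has_upper := password.toList.any (fun c => pvUpperChars.contains c)
  let has_digit := password.toList.any (fun c => pvDigitChars.contains c)
  let has_special := password.toList.any (fun c => pvPunctChars.contains c)
  let has_space := PySem.Str.isIn " " password
  let has_other := password.toList.any
    (fun c => !((pvLowerChars ++ pvUpperChars ++ pvDigitChars ++ pvPunctChars ++ [' ']).contains c))
  let charset := if has_lower then charset + 26 else charset
  let charset := if has_upper then charset + 26 else charset
  let charset := if has_digit then charset + 10 else charset
  let charset := if has_special then charset + 32 else charset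
  let charset := if has_space then charset + 1 else charset
  let charset := if has_other then charset + 64 else charset
  max charset 1

-- ===== PORT B =====
-- one flag per disjoint class: (lower, upper, digit, special, space, other)
-- o = ord(ch), tested against the disjoint class ranges in order
def pvAltStep (st : Bool × Bool × Bool × Bool × Bool × Bool) (c : Char) :
    Bool × Bool × Bool × Bool × Bool × Bool :=
  if 97 ≤ c.toNat ∧ c.toNat ≤ 122 then (true, st.2.1, st.2.2.1, st.2.2.2.1, st.2.2.2.2.1, st.2.2.2.2.2)
  else if 65 ≤ c.toNat ∧ c.toNat ≤ 90 then (st.1, true, st.2.2.1, st.2.2.2.1, st.2.2.2.2.1, st.2.2.2.2.2)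
  else if 48 ≤ c.toNat ∧ c.toNat ≤ 57 then (st.1, st.2.1, true, st.2.2.2.1, st.2.2.2.2.1, st.2.2.2.2.2)
  else if 33 ≤ c.toNat ∧ c.toNat ≤ 126 then (st.1, st.2.1, st.2.2.1, true, st.2.2.2.2.1, st.2.2.2.2.2)
  else if c.toNat = 32 then (st.1, st.2.1, st.2.2.1, st.2.2.2.1, true, st.2.2.2.2.2)
  else (st.1, st.2.1, st.2.2.1, st.2.2.2.1, st.2.2.2.2.1, true)

def calculate_charset_size_py_alt (password : String) : Int :=
  let f := password.toList.foldl pvAltStep (false, false, false, false, false, false)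
  let total : Int :=
    26 * (if f.1 then (1 : Int) else 0) + 26 * (if f.2.1 then (1 : Int) else 0) +
    10 * (if f.2.2.1 then (1 : Int) else 0) + 32 * (if f.2.2.2.1 then (1 : Int) else 0) +
    1 * (if f.2.2.2.2.1 then (1 : Int) else 0) + 64 * (if f.2.2.2.2.2 then (1 : Int) else 0)
  max total 1

-- ===== PRECONDITION & SPEC =====
def Spec_calculate_charset_size_py (password : String) (out : Int) : Prop := out = calculate_charset_size_py_alt password
instance (password : String) (out : Int) : Decidable (Spec_calculate_charset_size_py password out) := by unfold Spec_calculate_charset_size_py; infer_instance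

-- ===== CLAIM (what is proved, stated in full; the proofs are below) =====
def Claim_equal_calculate_charset_size_py : Prop := ∀ (password : String), Dom_calculate_charset_size_py password → Spec_calculate_charset_size_py password (calculate_charset_size_py password)

-- ===== LEMMAS AND PROOFS =====

theorem pvCharBeq (c d : Char) : (c == d) = (c.toNat == d.toNat) := by
  rw [Bool.beq_eq_decide_eq, Bool.beq_eq_decide_eq]
  exact decide_eq_decide.mpr ⟨fun h => by subst h; rfl,
    fun h => Char.ext (UInt32.toNat_inj.mp h)⟩

theorem pvCharEqOfNat (c : Char) (n : Nat) (hv : n.isValidChar) (h : c.toNat = n) :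
    c = Char.ofNat n := by
  apply Char.ext
  apply UInt32.toNat_inj.mp
  show c.toNat = (Char.ofNat n).toNat
  rw [Char.toNat_ofNat, if_pos hv, h]

theorem pvLowerMem (c : Char) :
    pvLowerChars.contains c = decide (97 ≤ c.toNat ∧ c.toNat ≤ 122) := by
  rw [Bool.eq_iff_iff, List.contains_iff_mem, decide_eq_true_eq]
  constructor
  · intro h; fin_cases h <;> decide
  · rintro ⟨h1, h2⟩
    obtain ⟨n, hn⟩ : ∃ n, c.toNat = n := ⟨_, rfl⟩
    rw [hn] at h1 h2
    interval_cases n <;> rw [pvCharEqOfNat c _ (by decide) hn] <;> decide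

theorem pvUpperMem (c : Char) :
    pvUpperChars.contains c = decide (65 ≤ c.toNat ∧ c.toNat ≤ 90) := by
  rw [Bool.eq_iff_iff, List.contains_iff_mem, decide_eq_true_eq]
  constructor
  · intro h; fin_cases h <;> decide
  · rintro ⟨h1, h2⟩
    obtain ⟨n, hn⟩ : ∃ n, c.toNat = n := ⟨_, rfl⟩
    rw [hn] at h1 h2
    interval_cases n <;> rw [pvCharEqOfNat c _ (by decide) hn] <;> decide

theorem pvDigitMem (c : Char) :
    pvDigitChars.contains c = decide (48 ≤ c.toNat ∧ c.toNat ≤ 57) := by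
  rw [Bool.eq_iff_iff, List.contains_iff_mem, decide_eq_true_eq]
  constructor
  · intro h; fin_cases h <;> decide
  · rintro ⟨h1, h2⟩
    obtain ⟨n, hn⟩ : ∃ n, c.toNat = n := ⟨_, rfl⟩
    rw [hn] at h1 h2
    interval_cases n <;> rw [pvCharEqOfNat c _ (by decide) hn] <;> decide

theorem pvPunctMem (c : Char) :
    pvPunctChars.contains c =
      decide (33 ≤ c.toNat ∧ c.toNat ≤ 126 ∧ ¬(97 ≤ c.toNat ∧ c.toNat ≤ 122) ∧
        ¬(65 ≤ c.toNat ∧ c.toNat ≤ 90) ∧ ¬(48 ≤ c.toNat ∧ c.toNat ≤ 57)) := by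
  rw [Bool.eq_iff_iff, List.contains_iff_mem, decide_eq_true_eq]
  constructor
  · intro h; fin_cases h <;> decide
  · rintro ⟨h1, h2, h3, h4, h5⟩
    obtain ⟨n, hn⟩ : ∃ n, c.toNat = n := ⟨_, rfl⟩
    rw [hn] at h1 h2 h3 h4 h5
    interval_cases n <;>
      first
      | omega
      | (rw [pvCharEqOfNat c _ (by decide) hn]; decide)

theorem pvAllMem (c : Char) :
    ((pvLowerChars ++ pvUpperChars ++ pvDigitChars ++ pvPunctChars ++ [' ']).contains c) =
      decide (32 ≤ c.toNat ∧ c.toNat ≤ 126) := by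
  rw [Bool.eq_iff_iff, List.contains_iff_mem, decide_eq_true_eq]
  constructor
  · intro h; fin_cases h <;> decide
  · rintro ⟨h1, h2⟩
    obtain ⟨n, hn⟩ : ∃ n, c.toNat = n := ⟨_, rfl⟩
    rw [hn] at h1 h2
    interval_cases n <;> rw [pvCharEqOfNat c _ (by decide) hn] <;> decide

theorem pvSpaceBeq (c : Char) : (c == ' ') = decide (c.toNat = 32) := by
  rw [pvCharBeq, Bool.beq_eq_decide_eq]
  rfl

-- per-character step: B's disjoint classification sets exactly the flags of A's tests
theorem pvStepChar (c : Char) (st : Bool × Bool × Bool × Bool × Bool × Bool) :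
    pvAltStep st c =
      (st.1 || pvLowerChars.contains c,
       st.2.1 || pvUpperChars.contains c,
       st.2.2.1 || pvDigitChars.contains c,
       st.2.2.2.1 || pvPunctChars.contains c,
       st.2.2.2.2.1 || (c == ' '),
       st.2.2.2.2.2 ||
         !((pvLowerChars ++ pvUpperChars ++ pvDigitChars ++ pvPunctChars ++ [' ']).contains c)) := by
  rw [pvLowerMem, pvUpperMem, pvDigitMem, pvPunctMem, pvSpaceBeq, pvAllMem]
  unfold pvAltStep
  split_ifs with h1 h2 h3 h4 h5 <;>
    simp only [Prod.mk.injEq] <;>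
    refine ⟨?_, ?_, ?_, ?_, ?_, ?_⟩ <;>
    first
    | rw [decide_eq_true (by omega), Bool.or_true]
    | rw [decide_eq_false (by omega), Bool.or_false]
    | (rw [decide_eq_true (by omega)]; simp)
    | (rw [decide_eq_false (by omega)]; simp)

-- loop invariant: the fold accumulates exactly A's six any-scans
theorem pvFoldB (cs : List Char) (st : Bool × Bool × Bool × Bool × Bool × Bool) :
    cs.foldl pvAltStep st =
      (st.1 || cs.any (fun c => pvLowerChars.contains c),
       st.2.1 || cs.any (fun c => pvUpperChars.contains c),
       st.2.2.1 || cs.any (fun c => pvDigitChars.contains c),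
       st.2.2.2.1 || cs.any (fun c => pvPunctChars.contains c),
       st.2.2.2.2.1 || cs.any (fun c => c == ' '),
       st.2.2.2.2.2 || cs.any
         (fun c => !((pvLowerChars ++ pvUpperChars ++ pvDigitChars ++ pvPunctChars ++ [' ']).contains c))) := by
  induction cs generalizing st with
  | nil => simp
  | cons c cs ih =>
    rw [List.foldl_cons, ih, pvStepChar]
    simp [Bool.or_assoc]

theorem pvSpaceScan (password : String) :
    PySem.Str.isIn " " password = password.toList.any (fun c => c == ' ') := by
  rw [Bool.eq_iff_iff, PySem.Str.isIn_iff_infix]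
  show [' '] <:+: _ ↔ _
  rw [List.singleton_infix_iff]
  simp [List.any_eq_true]

-- ===== VERDICT (by name: the statement is the Claim_ definition above) =====
theorem calculate_charset_size_py_spec : Claim_equal_calculate_charset_size_py := by
  intro password _
  unfold Spec_calculate_charset_size_py calculate_charset_size_py calculate_charset_size_py_alt
  rw [pvFoldB, pvSpaceScan]
  simp only [Bool.false_or]
  cases password.toList.any (fun c => pvLowerChars.contains c) <;>
  cases password.toList.any (fun c => pvUpperChars.contains c) <;>
  cases password.toList.any (fun c => pvDigitChars.contains c) <;>
  cases password.toList.any (fun c => pvPunctChars.contains c) <;>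
  cases password.toList.any (fun c => c == ' ') <;>
  cases password.toList.any
    (fun c => !((pvLowerChars ++ pvUpperChars ++ pvDigitChars ++ pvPunctChars ++ [' ']).contains c)) <;>
  norm_num
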